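-- pv_equiv track=rewrite | github.com/Andrea1198/qip | qft/main.py | generate_coeff
-- ===== SOURCE A (Python) =====
-- n = 3
--
-- def generate_coeff(num):
--     coeffs = []
--     for i in range(n-1,-1,-1):
--         coeffs.append([0,num // (2 ** i)])
--         num -= (num // (2 ** i)) * (2 ** i)
--
--     for i in range(n):
--         coeffs[i][0] = 1 - coeffs[i][1]
--
--     coeffs = coeffs[::-1]
--     return coeffs
-- ===== SOURCE B (Python) =====
-- n = 3
--
-- def generate_coeff(num):
--     # Each 3-bit digit computed independently in closed form, built LSB-first
--     # (no running remainder, no reversal).  Top digit is the full quotient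
--     # num // 4, matching the overflow behaviour for num >= 8 and negatives.
--     d0 = num % 2
--     d1 = (num // 2) % 2
--     d2 = num // 4
--     return [[1 - d0, d0], [1 - d1, d1], [1 - d2, d2]]
-- ===== Notes on version B (the rewrite author's own statement) =====
-- stated objective: simpler
-- what changed: Replaces the two loops (MSB-first remainder-threading digit extraction, in-place complement pass, then list reversal) by three independent closed-form digit formulas assembled directly in LSB-first order.
import Mathlib
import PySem

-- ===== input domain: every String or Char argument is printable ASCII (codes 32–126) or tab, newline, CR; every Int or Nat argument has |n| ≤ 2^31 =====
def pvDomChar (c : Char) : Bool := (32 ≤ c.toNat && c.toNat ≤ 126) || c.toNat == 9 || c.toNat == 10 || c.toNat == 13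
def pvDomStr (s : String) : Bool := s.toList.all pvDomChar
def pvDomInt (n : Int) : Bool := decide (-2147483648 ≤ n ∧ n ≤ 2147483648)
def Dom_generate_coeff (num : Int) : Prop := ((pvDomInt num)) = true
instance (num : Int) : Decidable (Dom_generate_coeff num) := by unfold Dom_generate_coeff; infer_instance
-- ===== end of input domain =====

-- B replaces A's two loops and reversal by closed-form digits (objective: simpler).

-- ===== PORT A =====
def generate_coeff (num : Int) : List (List Int) :=
  -- first loop: for i in range(n-1,-1,-1): append [0, num // 2**i]; num -= (num // 2**i) * 2**i
  let st := (PySem.List.pyRange 2 (-1) (-1)).foldl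
    (fun (st : List (List Int) × Int) i =>
      let coeffs := st.1
      let nm := st.2
      let coeffs := coeffs ++ [[0, PySem.Int.floordiv nm (2 ^ i.toNat)]]
      (coeffs, nm - (PySem.Int.floordiv nm (2 ^ i.toNat)) * (2 ^ i.toNat)))
    ([], num)
  let coeffs := st.1
  -- second loop: for i in range(n): coeffs[i][0] = 1 - coeffs[i][1]
  let coeffs := (PySem.List.pyRange 0 3 1).foldl
    (fun (cs : List (List Int)) i =>
      cs.modify i.toNat (fun row => row.set 0 (1 - PySem.List.pyGetD row 1 0)))
    coeffs
  -- coeffs = coeffs[::-1]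
  (PySem.List.slice? coeffs none none (-1)).getD []

-- ===== PORT B =====
def generate_coeff_alt (num : Int) : List (List Int) :=
  let d0 := PySem.Int.mod num 2
  let d1 := PySem.Int.mod (PySem.Int.floordiv num 2) 2
  let d2 := PySem.Int.floordiv num 4
  [[1 - d0, d0], [1 - d1, d1], [1 - d2, d2]]

-- ===== PRECONDITION & SPEC =====
def Spec_generate_coeff (num : Int) (out : List (List Int)) : Prop := out = generate_coeff_alt num
instance (num : Int) (out : List (List Int)) : Decidable (Spec_generate_coeff num out) := by unfold Spec_generate_coeff; infer_instance

-- ===== CLAIM (what is proved, stated in full; the proofs are below) =====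
def Claim_equal_generate_coeff : Prop := ∀ (num : Int), Dom_generate_coeff num → Spec_generate_coeff num (generate_coeff num)

-- ===== LEMMAS AND PROOFS =====

-- ===== VERDICT (by name: the statement is the Claim_ definition above) =====
theorem generate_coeff_spec : Claim_equal_generate_coeff := by
  intro num _
  unfold Spec_generate_coeff generate_coeff generate_coeff_alt
  have h2 : PySem.List.pyRange 2 (-1) (-1) = [2, 1, 0] := by decide
  have h3 : PySem.List.pyRange 0 3 1 = [0, 1, 2] := by decide
  rw [h2, h3]
  simp only [List.foldl, PySem.List.slice?_none_none_neg_one]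
  norm_num [List.modify, List.modifyTailIdx, List.modifyHead, PySem.List.pyGetD, PySem.List.pyGet?, PySem.List.pyIdx?,
    PySem.Int.floordiv_eq_ediv_of_pos (show (0:Int) < 1 by norm_num),
    PySem.Int.floordiv_eq_ediv_of_pos (show (0:Int) < 2 by norm_num),
    PySem.Int.floordiv_eq_ediv_of_pos (show (0:Int) < 4 by norm_num),
    PySem.Int.mod_eq_emod_of_pos (show (0:Int) < 2 by norm_num)]
  norm_num [Int.toNat]
  simp only [List.modifyTailIdx.go, List.modifyHead, List.length, List.set]
  norm_num
  omega
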